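-- pv_equiv track=rewrite | github.com/fwu1/spectroscope | AS7265x.py | decodeSpectrum
-- ===== SOURCE A (Python) =====
-- spectrumOrders=[8, 10, 12, 13, 14, 15,  6, 7, 9, 11, 16, 17,  0, 1, 2, 3, 4, 5]
--
-- def decodeSpectrum(values):
--     intValues=[0]*18
--     idx=0
--     for value in values.split(','):
--         if idx<18:
--             order=spectrumOrders[idx]
--             idx+=1
--             intValues[order]=int(value)
--     return intValues
-- ===== SOURCE B (Python) =====
-- spectrumOrders=[8, 10, 12, 13, 14, 15,  6, 7, 9, 11, 16, 17,  0, 1, 2, 3, 4, 5]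
--
-- # inverse table: _inv[p] = the CSV index that supplies output slot p
-- _inv = [spectrumOrders.index(p) for p in range(18)]
--
-- def decodeSpectrum(values):
--     parts = values.split(',')
--     return [int(parts[_inv[p]]) if _inv[p] < len(parts) else 0 for p in range(18)]
-- ===== Notes on version B (the rewrite author's own statement) =====
-- stated objective: alternative
-- what changed: B precomputes the inverse permutation of spectrumOrders and gathers the 18 outputs by output position with a guarded comprehension, instead of A's scatter loop that counts an input index and writes through the forward table.
import Mathlib
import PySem

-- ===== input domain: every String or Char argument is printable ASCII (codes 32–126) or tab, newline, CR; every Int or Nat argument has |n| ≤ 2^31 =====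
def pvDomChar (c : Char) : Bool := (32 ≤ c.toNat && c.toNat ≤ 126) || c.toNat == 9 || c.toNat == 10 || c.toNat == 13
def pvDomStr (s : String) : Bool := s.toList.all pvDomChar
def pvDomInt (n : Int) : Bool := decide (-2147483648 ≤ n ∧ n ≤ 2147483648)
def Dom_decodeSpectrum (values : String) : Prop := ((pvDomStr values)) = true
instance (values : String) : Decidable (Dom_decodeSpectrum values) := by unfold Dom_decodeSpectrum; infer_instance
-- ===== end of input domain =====

-- B gathers by output position through a precomputed inverse of spectrumOrders, replacing A's scatter loop with a counter (objective: alternative decomposition, same cost).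

-- ===== PORT A =====
def spectrumOrdersA : List Int := [8, 10, 12, 13, 14, 15, 6, 7, 9, 11, 16, 17, 0, 1, 2, 3, 4, 5]

-- loop body of A; int(value) raises ValueError on non-int text — those inputs are excluded by Pre_, so the .getD 0 total form is exact on Pre_
def stepA (st : Int × List Int) (value : String) : Int × List Int :=
  if st.1 < 18 then
    -- order = spectrumOrders[idx]; 0 ≤ idx < 18 here, so the pyGetD total form is exact
    (st.1 + 1, PySem.List.pySetD st.2 (PySem.List.pyGetD spectrumOrdersA st.1 0)
      ((PySem.Int.ofStr? value).getD 0))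
  else st

-- values.split(','): split? is some because the separator is non-empty
def decodeSpectrum (values : String) : List Int :=
  (((PySem.Str.split? values ",").getD []).foldl stepA ((0 : Int), List.replicate 18 (0 : Int))).2

-- ===== PORT B =====
-- _inv[p] = spectrumOrders.index(p): B's precomputed module-level constant, written out
def invOrders : List Int := [12, 13, 14, 15, 16, 17, 6, 7, 0, 8, 1, 9, 2, 3, 4, 5, 10, 11]

def decodeSpectrum_alt (values : String) : List Int :=
  let parts := (PySem.Str.split? values ",").getD []
  (PySem.List.pyRange 0 18 1).map (fun p =>
    let i := PySem.List.pyGetD invOrders p 0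
    -- parts[_inv[p]] under the guard i < len(parts): 0 ≤ i < 18, so the pyGetD total form is exact
    if i < (parts.length : Int) then (PySem.Int.ofStr? (PySem.List.pyGetD parts i "")).getD 0 else 0)

-- ===== PRECONDITION & SPEC =====
-- Pre_ excludes exactly the inputs where the Python A raises ValueError: one of the first 18
-- comma-separated fields is not int()-parseable (B calls int() on exactly the same fields).
def Pre_decodeSpectrum (values : String) : Prop :=
  ((((PySem.Str.split? values ",").getD []).take 18).all
    (fun s => (PySem.Int.ofStr? s).isSome)) = true
instance (values : String) : Decidable (Pre_decodeSpectrum values) := by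
  unfold Pre_decodeSpectrum; infer_instance

def pvWitness_decodeSpectrum : String := "1,2,3"

def Spec_decodeSpectrum (values : String) (out : List Int) : Prop := out = decodeSpectrum_alt values
instance (values : String) (out : List Int) : Decidable (Spec_decodeSpectrum values out) := by
  unfold Spec_decodeSpectrum; infer_instance

-- ===== CLAIM (what is proved, stated in full; the proofs are below) =====
def Claim_equal_decodeSpectrum : Prop := ∀ (values : String), Dom_decodeSpectrum values → Pre_decodeSpectrum values → Spec_decodeSpectrum values (decodeSpectrum values)

-- ===== LEMMAS AND PROOFS =====

-- Nat-level views of the two permutation tables, for index bookkeeping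
def ordN (i : Nat) : Nat := [8, 10, 12, 13, 14, 15, 6, 7, 9, 11, 16, 17, 0, 1, 2, 3, 4, 5].getD i 0
def invN (q : Nat) : Nat := [12, 13, 14, 15, 16, 17, 6, 7, 0, 8, 1, 9, 2, 3, 4, 5, 10, 11].getD q 0

lemma ord_inv : ∀ q < 18, ordN (invN q) = q ∧ invN q < 18 := by decide
lemma inv_ord : ∀ i < 18, invN (ordN i) = i ∧ ordN i < 18 := by decide

lemma spectrumOrdersA_getD (i : Nat) : spectrumOrdersA.getD i 0 = (ordN i : Int) := by
  by_cases h : i < 18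
  · interval_cases i <;> rfl
  · unfold spectrumOrdersA ordN
    rw [List.getD_eq_default _ _ (by simp; omega), List.getD_eq_default _ _ (by simp; omega)]
    rfl

lemma invOrders_getD (q : Nat) : invOrders.getD q 0 = (invN q : Int) := by
  by_cases h : q < 18
  · interval_cases q <;> rfl
  · unfold invOrders invN
    rw [List.getD_eq_default _ _ (by simp; omega), List.getD_eq_default _ _ (by simp; omega)]
    rfl

-- one active iteration of A's loop, with Nat-level index
lemma stepA_active (idx : Nat) (acc : List Int) (v : String) (h : idx < 18) :
    stepA ((idx : Int), acc) v
      = (((idx + 1 : Nat) : Int), acc.set (ordN idx) ((PySem.Int.ofStr? v).getD 0)) := by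
  have hc : ((idx : Int), acc).1 < 18 := by
    show (idx : Int) < 18
    exact_mod_cast h
  unfold stepA
  rw [if_pos hc]
  simp only [PySem.List.pyGetD_natCast, spectrumOrdersA_getD, PySem.List.pySetD_natCast]
  have hcast : (idx : Int) + 1 = ((idx + 1 : Nat) : Int) := by push_cast; ring
  rw [hcast]

-- A's loop preserves the length of the accumulator
lemma fold_len : ∀ (ps : List String) (st : Int × List Int),
    ((ps.foldl stepA st).2).length = st.2.length := by
  intro ps
  induction ps with
  | nil => intro st; rfl
  | cons v ps ih =>
    intro st
    rw [List.foldl_cons, ih]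
    unfold stepA
    split
    · simp [PySem.List.length_pySetD]
    · rfl

-- once idx has reached 18, A's loop no longer changes its state
lemma fold_stop : ∀ (ps : List String) (st : Int × List Int), 18 ≤ st.1 →
    ps.foldl stepA st = st := by
  intro ps
  induction ps with
  | nil => intro st _; rfl
  | cons v ps ih =>
    intro st h
    have hs : stepA st v = st := by
      unfold stepA; rw [if_neg (by omega)]
    rw [List.foldl_cons, hs, ih st h]

-- element-wise characterisation of A's scatter loop
lemma foldA_get : ∀ (t : List String) (idx : Nat) (acc : List Int),
    idx + t.length ≤ 18 → acc.length = 18 → ∀ q, q < 18 →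
    ((t.foldl stepA ((idx : Int), acc)).2)[q]? =
      (if idx ≤ invN q ∧ invN q < idx + t.length
       then some ((PySem.Int.ofStr? (t.getD (invN q - idx) "")).getD 0)
       else acc[q]?) := by
  intro t
  induction t with
  | nil =>
    intro idx acc _ _ q _
    rw [List.foldl_nil, if_neg (by simp)]
  | cons v t ih =>
    intro idx acc hle hlen q hq
    have hidx : idx < 18 := by simp at hle; omega
    rw [List.foldl_cons, stepA_active idx acc v hidx,
        ih (idx + 1) _ (by simp at hle ⊢; omega) (by simp [hlen]) q hq]
    by_cases hA : idx + 1 ≤ invN q ∧ invN q < idx + 1 + t.length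
    · rw [if_pos hA, if_pos (by simp; omega)]
      have : invN q - idx = (invN q - (idx + 1)) + 1 := by omega
      rw [this, List.getD_cons_succ]
    · rw [if_neg hA]
      by_cases hB : idx ≤ invN q ∧ invN q < idx + (v :: t).length
      · -- the element written at this very step: invN q = idx, so q = ordN idx
        have hinv : invN q = idx := by simp at hB; omega
        have hqord : ordN idx = q := by
          have := (ord_inv q hq).1; rw [hinv] at this; exact this
        rw [if_pos hB, hinv, Nat.sub_self, List.getD_cons_zero, ← hqord,
            List.getElem?_set_self (by omega)]
      · -- untouched position: q ≠ ordN idx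
        rw [if_neg hB]
        have hne : q ≠ ordN idx := by
          intro hcontra
          have := (inv_ord idx hidx).1
          rw [← hcontra] at this
          simp at hA hB
          omega
        rw [List.getElem?_set_ne (fun h => hne h.symm)]

-- B reads field invN q for output slot q (q < 18)
lemma altB_get (ps : List String) (q : Nat) (hq : q < 18) :
    ((PySem.List.pyRange 0 18 1).map (fun p =>
      let i := PySem.List.pyGetD invOrders p 0
      if i < (ps.length : Int) then (PySem.Int.ofStr? (PySem.List.pyGetD ps i "")).getD 0 else 0))[q]?
    = some (if invN q < ps.length
            then (PySem.Int.ofStr? (ps.getD (invN q) "")).getD 0 else 0) := by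
  rw [show (18 : Int) = ((18 : Nat) : Int) from rfl,
      PySem.List.getElem?_map_pyRange_zero _ 18 q hq]
  simp only [PySem.List.pyGetD_natCast, invOrders_getD]
  by_cases h : invN q < ps.length
  · rw [if_pos (by exact_mod_cast h), if_pos h]
  · rw [if_neg (by exact_mod_cast h), if_neg h]

-- the two ports agree for every split result
lemma main_eq (ps : List String) :
    (ps.foldl stepA ((0 : Int), List.replicate 18 (0 : Int))).2 =
      (PySem.List.pyRange 0 18 1).map (fun p =>
        let i := PySem.List.pyGetD invOrders p 0
        if i < (ps.length : Int) then (PySem.Int.ofStr? (PySem.List.pyGetD ps i "")).getD 0 else 0) := by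
  have hlenA : ((ps.foldl stepA ((0 : Int), List.replicate 18 (0 : Int))).2).length = 18 := by
    rw [fold_len]; simp
  have hlenB : ((PySem.List.pyRange 0 18 1).map (fun p =>
      let i := PySem.List.pyGetD invOrders p 0
      if i < (ps.length : Int) then (PySem.Int.ofStr? (PySem.List.pyGetD ps i "")).getD 0 else 0)).length = 18 := by
    simp [PySem.List.length_pyRange_one]
  -- reduce the fold to the first 18 fields
  have hfold : (ps.foldl stepA ((0 : Int), List.replicate 18 (0 : Int))).2
      = ((ps.take 18).foldl stepA ((0 : Int), List.replicate 18 (0 : Int))).2 := by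
    by_cases h : ps.length ≤ 18
    · rw [List.take_of_length_le h]
    · conv_lhs => rw [← List.take_append_drop 18 ps]
      rw [List.foldl_append]
      have hlen18 : (ps.take 18).length = 18 := by rw [List.length_take]; omega
      have hfst : ((ps.take 18).foldl stepA ((0 : Int), List.replicate 18 (0 : Int))).1 = 18 := by
        have : ∀ (t : List String) (idx : Nat) (acc : List Int), idx + t.length ≤ 18 →
            (t.foldl stepA ((idx : Int), acc)).1 = ((idx + t.length : Nat) : Int) := by
          intro t
          induction t with
          | nil => intro idx acc _; simp
          | cons v t ihh =>
            intro idx acc hle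
            have hidx : idx < 18 := by simp at hle; omega
            rw [List.foldl_cons, stepA_active idx acc v hidx,
                ihh (idx + 1) _ (by simp at hle ⊢; omega)]
            push_cast; simp; omega
        have := this (ps.take 18) 0 (List.replicate 18 (0 : Int)) (by rw [hlen18])
        rw [hlen18] at this; simpa using this
      rw [fold_stop (ps.drop 18) _ (by rw [hfst])]
  apply List.ext_getElem?
  intro q
  by_cases hq : q < 18
  · have hA := foldA_get (ps.take 18) 0 (List.replicate 18 (0 : Int))
      (by rw [List.length_take]; omega) (by simp) q hq
    rw [Nat.cast_zero] at hA
    rw [hfold, altB_get ps q hq, hA]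
    have hinv18 : invN q < 18 := (ord_inv q hq).2
    have hmin : (ps.take 18).length = min 18 ps.length := List.length_take
    by_cases h : invN q < ps.length
    · rw [if_pos (by rw [hmin]; omega), if_pos h]
      congr 2
      rw [Nat.sub_zero, List.getD_eq_getElem?_getD, List.getD_eq_getElem?_getD,
          List.getElem?_take, if_pos hinv18]
    · rw [if_neg (by rw [hmin]; omega), if_neg h,
          List.getElem?_replicate, if_pos hq]
  · rw [List.getElem?_eq_none (by omega), List.getElem?_eq_none (by omega)]

-- ===== VERDICT (by name: the statement is the Claim_ definition above) =====
theorem decodeSpectrum_spec : Claim_equal_decodeSpectrum := by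
  intro values _ _
  unfold Spec_decodeSpectrum decodeSpectrum decodeSpectrum_alt
  exact main_eq ((PySem.Str.split? values ",").getD [])
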